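-- pv_equiv track=rewrite | github.com/wlwl1011/coding-test | programmers/bruteForce/1.py | solution
-- ===== SOURCE A (Python) =====
-- def solution(sizes):
--     answer = 0
--     max_value = []
--     min_value = []
--
--     #가로
--     for i in sizes:
--         max_value.append(max(i))
--         min_value.append(min(i))
--
--     answer = max(max_value) * max(min_value)
--
--     return answer
-- ===== SOURCE B (Python) =====
-- def solution(sizes):
--     # divide-and-conquer over index halves: (largest side, largest short side) of sizes[lo:hi]
--     def extremes(lo, hi):
--         if hi - lo == 1:
--             card = sizes[lo]
--             return max(card), min(card)
--         mid = (lo + hi) // 2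
--         b1, s1 = extremes(lo, mid)
--         b2, s2 = extremes(mid, hi)
--         return max(b1, b2), max(s1, s2)
--     big, small = extremes(0, len(sizes))
--     return big * small
-- ===== Notes on version B (the rewrite author's own statement) =====
-- stated objective: alternative
-- what changed: Replaces A's two intermediate lists plus two reduction passes by a recursive divide-and-conquer over index halves that returns the pair (max of per-card maxes, max of per-card mins) for each half and merges them; correct because max is associative and commutative.
-- outside the precondition, e.g. on solution([]): A raises ValueError, B raises RecursionError; on solution([[]]): A raises ValueError, B raises ValueError
import Mathlib
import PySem

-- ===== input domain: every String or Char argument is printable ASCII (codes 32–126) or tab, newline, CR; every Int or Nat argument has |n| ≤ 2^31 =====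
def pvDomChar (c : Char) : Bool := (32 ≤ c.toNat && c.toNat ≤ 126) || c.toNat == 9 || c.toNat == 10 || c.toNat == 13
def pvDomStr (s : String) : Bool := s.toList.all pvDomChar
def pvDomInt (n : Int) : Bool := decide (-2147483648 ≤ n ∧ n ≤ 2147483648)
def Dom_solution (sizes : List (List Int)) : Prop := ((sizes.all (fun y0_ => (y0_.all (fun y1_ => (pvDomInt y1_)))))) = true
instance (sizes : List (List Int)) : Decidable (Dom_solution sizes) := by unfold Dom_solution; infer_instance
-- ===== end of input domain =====

-- B replaces A's two intermediate lists and two reduction passes by a divide-and-conquer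
-- recursion over index halves (alternative algorithm; same O(n) time).

-- ===== PORT A =====
-- A appends max(i)/min(i) to two lists, then multiplies the max of each.
-- (max?/min? return none only on an empty list, which Pre_ excludes; getD 0 is never reached inside Pre_.)
def solution (sizes : List (List Int)) : Int :=
  let p := sizes.foldl
    (fun (p : List Int × List Int) i =>
      (p.1 ++ [(PySem.List.max? i (fun x => x)).getD 0],
       p.2 ++ [(PySem.List.min? i (fun x => x)).getD 0]))
    ([], [])
  ((PySem.List.max? p.1 (fun x => x)).getD 0) * ((PySem.List.max? p.2 (fun x => x)).getD 0)

-- ===== PORT B =====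
-- extremes(lo, hi) of Source B; the extra fuel argument only makes the recursion total in Lean
-- (inside Pre_ the call depth is bounded by hi - lo, so fuel = sizes.length never runs out).
def pvExtremes (sizes : List (List Int)) : Nat → Nat → Nat → Int × Int
  | 0, _, _ => (0, 0)
  | fuel + 1, lo, hi =>
    if hi - lo == 1 then
      let card := (PySem.List.pyGet? sizes (lo : Int)).getD []
      ((PySem.List.max? card (fun x => x)).getD 0, (PySem.List.min? card (fun x => x)).getD 0)
    else
      let mid := (lo + hi) / 2
      let (b1, s1) := pvExtremes sizes fuel lo mid
      let (b2, s2) := pvExtremes sizes fuel mid hi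
      (max b1 b2, max s1 s2)

def solution_alt (sizes : List (List Int)) : Int :=
  let (big, small) := pvExtremes sizes sizes.length 0 sizes.length
  big * small

-- ===== PRECONDITION & SPEC =====
-- Pre_ excludes exactly the inputs where A raises ValueError: empty sizes, or any empty inner list.
def Pre_solution (sizes : List (List Int)) : Prop :=
  sizes ≠ [] ∧ ∀ i ∈ sizes, i ≠ []
instance (sizes : List (List Int)) : Decidable (Pre_solution sizes) := by
  unfold Pre_solution; infer_instance
def pvWitness_solution : List (List Int) := [[1, 2], [3, 1]]
def Spec_solution (sizes : List (List Int)) (out : Int) : Prop := out = solution_alt sizes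
instance (sizes : List (List Int)) (out : Int) : Decidable (Spec_solution sizes out) := by unfold Spec_solution; infer_instance

-- ===== CLAIM (what is proved, stated in full; the proofs are below) =====
def Claim_equal_solution : Prop := ∀ (sizes : List (List Int)), Dom_solution sizes → Pre_solution sizes → Spec_solution sizes (solution sizes)

-- ===== LEMMAS AND PROOFS =====

def pvM (i : List Int) : Int := (PySem.List.max? i (fun x => x)).getD 0
def pvm (i : List Int) : Int := (PySem.List.min? i (fun x => x)).getD 0

-- maximum of a list, 0 on []
def nmax : List Int → Int
  | [] => 0
  | x :: xs => xs.foldl max x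

lemma foldl_max_eq : ∀ (l : List Int), l ≠ [] → ∀ x : Int, l.foldl max x = max x (nmax l) := by
  intro l
  induction l with
  | nil => intro h; exact absurd rfl h
  | cons h t ih =>
      intro _ x
      show t.foldl max (max x h) = max x (nmax (h :: t))
      cases t with
      | nil => simp [nmax]
      | cons a b =>
          have hne : (a :: b) ≠ [] := by simp
          have hx : nmax (h :: a :: b) = max h (nmax (a :: b)) := ih hne h
          rw [ih hne (max x h), hx, max_assoc]

lemma nmax_append (a b : List Int) (ha : a ≠ []) (hb : b ≠ []) :
    nmax (a ++ b) = max (nmax a) (nmax b) := by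
  cases a with
  | nil => exact absurd rfl ha
  | cons x xs =>
      simp only [List.cons_append, nmax, List.foldl_append]
      rw [foldl_max_eq b hb]
      rfl

-- A's list-building fold produces the two map-lists.
lemma pvA_fold (sizes : List (List Int)) (a b : List Int) :
    sizes.foldl
      (fun (p : List Int × List Int) i =>
        (p.1 ++ [(PySem.List.max? i (fun x => x)).getD 0],
         p.2 ++ [(PySem.List.min? i (fun x => x)).getD 0]))
      (a, b) = (a ++ sizes.map pvM, b ++ sizes.map pvm) := by
  induction sizes generalizing a b with
  | nil => simp
  | cons h t ih => simp [List.foldl, ih, pvM, pvm]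

-- the divide-and-conquer recursion computes the two maxima over the slice [lo, hi)
lemma pvExtremes_spec (sizes : List (List Int)) :
    ∀ (fuel lo hi : Nat), hi ≤ sizes.length → lo < hi → hi - lo ≤ fuel →
      pvExtremes sizes fuel lo hi =
        (nmax (((sizes.drop lo).take (hi - lo)).map pvM),
         nmax (((sizes.drop lo).take (hi - lo)).map pvm)) := by
  intro fuel
  induction fuel with
  | zero => intro lo hi _ h2 h3; omega
  | succ fuel ih =>
      intro lo hi h1 h2 h3
      by_cases hone : hi - lo = 1
      · have hlt : lo < sizes.length := by omega
        have hdrop : sizes.drop lo = sizes[lo] :: sizes.drop (lo + 1) :=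
          List.drop_eq_getElem_cons hlt
        simp only [pvExtremes, hone, beq_self_eq_true, if_pos, hdrop, List.take_succ_cons,
          List.take_zero, List.map, nmax, List.foldl, PySem.List.pyGet?_natCast,
          List.getElem?_eq_getElem hlt, Option.getD_some]
        rfl
      · have hge : 2 ≤ hi - lo := by omega
        have hbeq : ((hi - lo == 1) = false) := by simp; omega
        have hlomid : lo < (lo + hi) / 2 := by omega
        have hmidhi : (lo + hi) / 2 < hi := by omega
        have e1 := ih lo ((lo + hi) / 2) (by omega) hlomid (by omega)
        have e2 := ih ((lo + hi) / 2) hi h1 hmidhi (by omega)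
        have hsplit : (sizes.drop lo).take (hi - lo)
            = (sizes.drop lo).take ((lo + hi) / 2 - lo)
              ++ (sizes.drop ((lo + hi) / 2)).take (hi - (lo + hi) / 2) := by
          have heq : hi - lo = ((lo + hi) / 2 - lo) + (hi - (lo + hi) / 2) := by omega
          rw [heq, List.take_add, List.drop_drop, Nat.add_sub_cancel' (le_of_lt hlomid)]
        have hlen1 : (sizes.drop lo).take ((lo + hi) / 2 - lo) ≠ [] := by
          apply List.ne_nil_of_length_pos
          simp only [List.length_take, List.length_drop, lt_min_iff]
          omega
        have hlen2 : (sizes.drop ((lo + hi) / 2)).take (hi - (lo + hi) / 2) ≠ [] := by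
          apply List.ne_nil_of_length_pos
          simp only [List.length_take, List.length_drop, lt_min_iff]
          omega
        have hm1 : ((sizes.drop lo).take ((lo + hi) / 2 - lo)).map pvM ≠ [] := by
          simpa using hlen1
        have hm2 : ((sizes.drop ((lo + hi) / 2)).take (hi - (lo + hi) / 2)).map pvM ≠ [] := by
          simpa using hlen2
        have hn1 : ((sizes.drop lo).take ((lo + hi) / 2 - lo)).map pvm ≠ [] := by
          simpa using hlen1
        have hn2 : ((sizes.drop ((lo + hi) / 2)).take (hi - (lo + hi) / 2)).map pvm ≠ [] := by
          simpa using hlen2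
        simp only [pvExtremes, hbeq, Bool.false_eq_true, if_false]
        rw [e1, e2, hsplit, List.map_append, List.map_append,
          nmax_append _ _ hm1 hm2, nmax_append _ _ hn1 hn2]

-- ===== VERDICT (by name: the statement is the Claim_ definition above) =====
theorem solution_spec : Claim_equal_solution := by
  intro sizes _ hpre
  obtain ⟨hne, _⟩ := hpre
  unfold Spec_solution solution solution_alt
  have hlen : 0 < sizes.length := List.length_pos_iff.mpr hne
  rw [pvExtremes_spec sizes sizes.length 0 sizes.length (le_refl _) hlen (by omega)]
  simp only [List.drop_zero, Nat.sub_zero, List.take_length]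
  cases sizes with
  | nil => exact absurd rfl hne
  | cons c t =>
      rw [pvA_fold]
      simp only [List.nil_append, List.map, PySem.List.max?_id_cons, Option.getD_some, nmax]
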